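-- pv_equiv track=rewrite | github.com/Soula09/Evaluation-and-visualization-program-for-EIS | datums.py | split_at_zeros
-- ===== SOURCE A (Python) =====
-- def split_at_zeros(xvals, yvals):
-- 	final_x, final_y = [], []
-- 	this_x, this_y = [], []
-- 	for x, y in zip(xvals, yvals):
-- 		if x!=0 or y!=0:
-- 			this_x.append(x)
-- 			this_y.append(y)
-- 		else:
-- 			if len(this_x) != 0:
-- 				final_x.append(this_x)
-- 				final_y.append(this_y)
-- 			this_x = []
-- 			this_y = []
-- 	if len(this_x) != 0:
-- 		final_x.append(this_x)
-- 		final_y.append(this_y)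
-- 	return final_x, final_y
-- ===== SOURCE B (Python) =====
-- def split_at_zeros(xvals, yvals):
--     # group-then-unzip: split the zipped sequence into maximal runs of equal
--     # "is zero point" key, drop the zero runs, and unzip each remaining run.
--     pairs = list(zip(xvals, yvals))
--
--     def runs(l):
--         out = []
--         i, n = 0, len(l)
--         while i < n:
--             key = (l[i][0] == 0 and l[i][1] == 0)
--             j = i + 1
--             while j < n and ((l[j][0] == 0 and l[j][1] == 0) == key):
--                 j += 1
--             out.append(l[i:j])
--             i = j
--         return out
--
--     good = [g for g in runs(pairs) if not (g[0][0] == 0 and g[0][1] == 0)]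
--     return [[p[0] for p in g] for g in good], [[p[1] for p in g] for g in good]
-- ===== Notes on version B (the rewrite author's own statement) =====
-- stated objective: alternative
-- what changed: Replaces A's accumulator/flush state machine with a group-then-unzip decomposition: split the zipped pairs into maximal runs of equal is-zero key, drop the zero runs, and unzip each surviving run.
import Mathlib
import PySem

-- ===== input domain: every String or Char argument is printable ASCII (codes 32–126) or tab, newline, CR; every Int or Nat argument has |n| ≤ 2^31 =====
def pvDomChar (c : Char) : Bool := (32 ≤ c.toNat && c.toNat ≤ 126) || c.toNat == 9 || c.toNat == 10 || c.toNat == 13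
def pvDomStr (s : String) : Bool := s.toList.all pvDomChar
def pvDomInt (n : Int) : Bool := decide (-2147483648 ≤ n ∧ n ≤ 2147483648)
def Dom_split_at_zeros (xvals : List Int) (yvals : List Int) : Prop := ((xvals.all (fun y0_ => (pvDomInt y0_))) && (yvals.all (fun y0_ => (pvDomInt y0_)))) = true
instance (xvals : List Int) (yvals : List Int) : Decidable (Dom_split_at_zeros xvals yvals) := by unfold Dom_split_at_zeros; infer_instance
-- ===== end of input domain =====

-- B replaces A's accumulator/flush state machine by a group-then-unzip decomposition
-- (split the zipped pairs into maximal runs of equal is-zero key, drop zero runs, unzip the rest); same cost, alternative structure.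

-- ===== PORT A =====
-- the for-loop of A with its state (final_x, final_y, this_x, this_y), plus the final flush
def pvALoop : List (Int × Int) → List (List Int) → List (List Int) → List Int → List Int → List (List Int) × List (List Int)
  | [], fx, fy, tx, ty => if tx.length ≠ 0 then (fx ++ [tx], fy ++ [ty]) else (fx, fy)
  | (x, y) :: rest, fx, fy, tx, ty =>
      if x ≠ 0 ∨ y ≠ 0 then pvALoop rest fx fy (tx ++ [x]) (ty ++ [y])
      else if tx.length ≠ 0 then pvALoop rest (fx ++ [tx]) (fy ++ [ty]) [] []
      else pvALoop rest fx fy [] []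

def split_at_zeros (xvals : List Int) (yvals : List Int) : List (List Int) × List (List Int) :=
  pvALoop (xvals.zip yvals) [] [] [] []

-- ===== PORT B =====
-- key of a pair: is it the zero point?
def pvKey (p : Int × Int) : Bool := p.1 == 0 && p.2 == 0

-- Source B's `runs`: maximal runs of equal key (the inner while-scan to j is takeWhile/dropWhile)
def pvRuns : List (Int × Int) → List (List (Int × Int))
  | [] => []
  | p :: rest =>
      (p :: rest.takeWhile (fun q => pvKey q == pvKey p)) ::
        pvRuns (rest.dropWhile (fun q => pvKey q == pvKey p))
termination_by l => l.length
decreasing_by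
  have := List.length_dropWhile_le (fun q => pvKey q == pvKey p) rest
  simp; omega

-- Source B's `good`: keep the runs whose first pair is not the zero point
def pvGoodGroups (l : List (Int × Int)) : List (List (Int × Int)) :=
  (pvRuns l).filter (fun g => match g with | [] => false | p :: _ => !pvKey p)

def split_at_zeros_alt (xvals : List Int) (yvals : List Int) : List (List Int) × List (List Int) :=
  let good := pvGoodGroups (xvals.zip yvals)
  (good.map (fun g => g.map Prod.fst), good.map (fun g => g.map Prod.snd))

-- ===== PRECONDITION & SPEC =====
def Spec_split_at_zeros (xvals : List Int) (yvals : List Int) (out : List (List Int) × List (List Int)) : Prop := out = split_at_zeros_alt xvals yvals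
instance (xvals : List Int) (yvals : List Int) (out : List (List Int) × List (List Int)) : Decidable (Spec_split_at_zeros xvals yvals out) := by unfold Spec_split_at_zeros; infer_instance

-- ===== CLAIM (what is proved, stated in full; the proofs are below) =====
def Claim_equal_split_at_zeros : Prop := ∀ (xvals : List Int) (yvals : List Int), Dom_split_at_zeros xvals yvals → Spec_split_at_zeros xvals yvals (split_at_zeros xvals yvals)

-- ===== LEMMAS AND PROOFS =====

-- takeWhile/dropWhile on a list split as (all-true prefix) ++ (rest whose head is false)
theorem pv_tw_dw (p : (Int × Int) → Bool) :
    ∀ (l1 l2 : List (Int × Int)), (∀ x ∈ l1, p x = true) →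
      (∀ q, l2.head? = some q → p q = false) →
      (l1 ++ l2).takeWhile p = l1 ∧ (l1 ++ l2).dropWhile p = l2 := by
  intro l1
  induction l1 with
  | nil =>
      intro l2 _ h2
      cases l2 with
      | nil => simp
      | cons q t => simp [h2 q rfl]
  | cons a t ih =>
      intro l2 h1 h2
      have ha : p a = true := h1 a (by simp)
      have := ih l2 (fun x hx => h1 x (by simp [hx])) h2
      simp [ha, this.1, this.2]

-- pvRuns peels off a maximal run whose key differs from the head of the rest
theorem pvRuns_prefix (c : Bool) :
    ∀ (g rest : List (Int × Int)), g ≠ [] → (∀ p ∈ g, pvKey p = c) →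
      (∀ q, rest.head? = some q → pvKey q ≠ c) →
      pvRuns (g ++ rest) = g :: pvRuns rest := by
  intro g rest hne hg hrest
  cases g with
  | nil => exact absurd rfl hne
  | cons a g' =>
      have ha : pvKey a = c := hg a (by simp)
      have htw := pv_tw_dw (fun q => pvKey q == pvKey a) g' rest
        (fun x hx => by simp [hg x (by simp [hx]), ha])
        (fun q hq => by simp [ha]; exact hrest q hq)
      rw [show (a :: g') ++ rest = a :: (g' ++ rest) by simp]
      rw [pvRuns]
      rw [htw.1, htw.2]

-- prepending a zero pair does not change the good groups
theorem pvGoodGroups_badCons :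
    ∀ (l : List (Int × Int)), ∀ p, pvKey p = true → pvGoodGroups (p :: l) = pvGoodGroups l := by
  intro l
  induction l with
  | nil => intro p hp; simp [pvGoodGroups, pvRuns, hp]
  | cons q l' ih =>
      intro p hp
      by_cases hq : pvKey q = true
      · have e1 : pvGoodGroups (p :: q :: l') = pvGoodGroups (q :: l') := by
          unfold pvGoodGroups
          rw [pvRuns, pvRuns]
          simp [hp, hq]
        rw [e1]
      · have hq' : pvKey q = false := by simpa using hq
        unfold pvGoodGroups
        rw [pvRuns]
        simp [hp, hq']

-- the loop of A, run from a partial nonzero run r, equals B's group-then-unzip of r ++ pairs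
theorem pvMain :
    ∀ (pairs r : List (Int × Int)) (fx fy : List (List Int)),
      (∀ p ∈ r, pvKey p = false) →
      pvALoop pairs fx fy (r.map Prod.fst) (r.map Prod.snd) =
        (fx ++ (pvGoodGroups (r ++ pairs)).map (fun g => g.map Prod.fst),
         fy ++ (pvGoodGroups (r ++ pairs)).map (fun g => g.map Prod.snd)) := by
  intro pairs
  induction pairs with
  | nil =>
      intro r fx fy hr
      cases r with
      | nil => simp [pvALoop, pvGoodGroups, pvRuns]
      | cons a r' =>
          have hruns : pvRuns ((a :: r') ++ []) = (a :: r') :: pvRuns [] :=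
            pvRuns_prefix false (a :: r') [] (by simp) hr (by intro q hq; simp at hq)
          have ha : pvKey a = false := hr a (by simp)
          have hgg : pvGoodGroups ((a :: r') ++ []) = [a :: r'] := by
            unfold pvGoodGroups
            rw [hruns]
            simp [pvRuns, ha]
          simp only [pvALoop, List.map_cons, List.length_cons]
          rw [if_pos (by omega)]
          rw [hgg]
          simp
  | cons p rest ih =>
      intro r fx fy hr
      obtain ⟨x, y⟩ := p
      by_cases hxy : x ≠ 0 ∨ y ≠ 0
      · have hk : pvKey (x, y) = false := by
          simp [pvKey]; omega
        have step : pvALoop ((x, y) :: rest) fx fy (r.map Prod.fst) (r.map Prod.snd) =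
            pvALoop rest fx fy (r.map Prod.fst ++ [x]) (r.map Prod.snd ++ [y]) := by
          rw [pvALoop, if_pos hxy]
        rw [step]
        have : r.map Prod.fst ++ [x] = (r ++ [(x, y)]).map Prod.fst := by simp
        rw [this]
        have : r.map Prod.snd ++ [y] = (r ++ [(x, y)]).map Prod.snd := by simp
        rw [this]
        have := ih (r ++ [(x, y)]) fx fy (by
          intro q hq
          rcases List.mem_append.mp hq with h | h
          · exact hr q h
          · simp at h; subst h; exact hk)
        rw [this]
        simp [List.append_assoc]
      · rw [not_or, not_not, not_not] at hxy
        obtain ⟨hx, hy⟩ := hxy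
        subst hx; subst hy
        have hk : pvKey ((0 : Int), (0 : Int)) = true := by simp [pvKey]
        cases r with
        | nil =>
            have step : pvALoop (((0 : Int), (0 : Int)) :: rest) fx fy [] [] =
                pvALoop rest fx fy [] [] := by
              rw [pvALoop]
              simp
            simp only [List.map_nil] at *
            rw [step]
            have := ih [] fx fy (by simp)
            simp only [List.nil_append, List.map_nil] at this ⊢
            rw [pvGoodGroups_badCons rest ((0 : Int), (0 : Int)) hk]
            exact this
        | cons a r' =>
            have ha : pvKey a = false := hr a (by simp)
            have step : pvALoop (((0 : Int), (0 : Int)) :: rest) fx fy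
                ((a :: r').map Prod.fst) ((a :: r').map Prod.snd) =
                pvALoop rest (fx ++ [(a :: r').map Prod.fst]) (fy ++ [(a :: r').map Prod.snd]) [] [] := by
              rw [pvALoop]
              simp
            rw [step]
            have := ih [] (fx ++ [(a :: r').map Prod.fst]) (fy ++ [(a :: r').map Prod.snd]) (by simp)
            simp only [List.nil_append] at this
            have this' := this
            rw [show pvALoop rest (fx ++ [(a :: r').map Prod.fst]) (fy ++ [(a :: r').map Prod.snd])
              ((List.nil : List (Int × Int)).map Prod.fst) ((List.nil : List (Int × Int)).map Prod.snd) =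
              pvALoop rest (fx ++ [(a :: r').map Prod.fst]) (fy ++ [(a :: r').map Prod.snd]) [] [] by simp] at this'
        -- compute the good groups of (a :: r') ++ (0,0) :: rest
            have hruns : pvRuns ((a :: r') ++ ((0 : Int), (0 : Int)) :: rest) =
                (a :: r') :: pvRuns (((0 : Int), (0 : Int)) :: rest) :=
              pvRuns_prefix false (a :: r') (((0 : Int), (0 : Int)) :: rest) (by simp) hr
                (by intro q hq; simp at hq; subst hq; simp [hk])
            have hgg : pvGoodGroups ((a :: r') ++ ((0 : Int), (0 : Int)) :: rest) =
                (a :: r') :: pvGoodGroups rest := by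
              unfold pvGoodGroups
              rw [hruns]
              have : pvGoodGroups (((0 : Int), (0 : Int)) :: rest) = pvGoodGroups rest :=
                pvGoodGroups_badCons rest _ hk
              unfold pvGoodGroups at this
              simp [ha, this]
            rw [this', hgg]
            simp

-- ===== VERDICT (by name: the statement is the Claim_ definition above) =====
theorem split_at_zeros_spec : Claim_equal_split_at_zeros := by
  intro xvals yvals _
  unfold Spec_split_at_zeros split_at_zeros split_at_zeros_alt
  have := pvMain (xvals.zip yvals) [] [] [] (by simp)
  simpa using this
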